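-- pv_equiv track=rewrite | github.com/ZyyyChen/NeUF | new_export_method/segment_roi.py | get_26neighbors
-- ===== SOURCE A (Python) =====
-- from itertools import product
--
-- def get_26neighbors(volume_shape, x, y, z):
--     max_z, max_y, max_x = (d - 1 for d in volume_shape)
--     neighbors = []
--     for dx, dy, dz in product((-1, 0, 1), repeat=3):
--         if dx == dy == dz == 0:
--             continue
--         nx, ny, nz = x + dx, y + dy, z + dz
--         if 0 <= nx <= max_x and 0 <= ny <= max_y and 0 <= nz <= max_z:
--             neighbors.append((nx, ny, nz))
--     return neighbors
-- ===== SOURCE B (Python) =====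
-- def get_26neighbors(volume_shape, x, y, z):
--     max_z, max_y, max_x = (d - 1 for d in volume_shape)
--     axes = [[v for v in (c - 1, c, c + 1) if 0 <= v <= m]
--             for c, m in ((x, max_x), (y, max_y), (z, max_z))]
--
--     def product_rec(axs):
--         if not axs:
--             return [()]
--         return [(v,) + rest for v in axs[0] for rest in product_rec(axs[1:])]
--
--     return [cell for cell in product_rec(axes) if cell != (x, y, z)]
-- ===== Notes on version B (the rewrite author's own statement) =====
-- stated objective: alternative
-- what changed: B first clamps each axis to its in-bounds candidate list, builds the whole in-bounds box by a recursive n-dimensional cartesian product helper, and drops the center in a separate final pass, instead of A's single triple loop over all 27 offsets with an inline bounds test per candidate.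
import Mathlib
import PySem

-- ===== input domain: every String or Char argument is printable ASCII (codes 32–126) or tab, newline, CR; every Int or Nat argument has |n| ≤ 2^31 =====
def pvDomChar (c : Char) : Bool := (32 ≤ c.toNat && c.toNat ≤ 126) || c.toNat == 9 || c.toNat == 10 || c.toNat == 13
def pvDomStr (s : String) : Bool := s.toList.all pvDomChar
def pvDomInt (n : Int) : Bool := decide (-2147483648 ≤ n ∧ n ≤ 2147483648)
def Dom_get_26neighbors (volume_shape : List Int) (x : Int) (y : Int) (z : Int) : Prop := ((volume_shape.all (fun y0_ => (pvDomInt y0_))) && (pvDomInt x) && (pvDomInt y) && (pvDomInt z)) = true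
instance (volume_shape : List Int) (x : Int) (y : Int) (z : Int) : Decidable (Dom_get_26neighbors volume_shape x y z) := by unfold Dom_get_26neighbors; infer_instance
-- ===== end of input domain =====

-- B clamps each axis to its in-bounds candidate list, builds the in-bounds box by a recursive
-- cartesian-product helper, and drops the center in a separate final pass (objective: alternative).

-- ===== PORT A =====
-- itertools.product((-1, 0, 1), repeat=3): dx outermost, then dy, then dz
def pvDeltas : List (Int × Int × Int) :=
  ([-1, 0, 1] : List Int).flatMap (fun dx =>
    ([-1, 0, 1] : List Int).flatMap (fun dy =>
      ([-1, 0, 1] : List Int).map (fun dz => (dx, dy, dz))))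

def get_26neighbors (volume_shape : List Int) (x : Int) (y : Int) (z : Int) : List (Int × Int × Int) :=
  match volume_shape with
  | [d0, d1, d2] =>
    let max_z := d0 - 1
    let max_y := d1 - 1
    let max_x := d2 - 1
    pvDeltas.foldl (fun neighbors t =>
      if t.1 = 0 ∧ t.2.1 = 0 ∧ t.2.2 = 0 then neighbors
      else
        let nx := x + t.1
        let ny := y + t.2.1
        let nz := z + t.2.2
        if 0 ≤ nx ∧ nx ≤ max_x ∧ 0 ≤ ny ∧ ny ≤ max_y ∧ 0 ≤ nz ∧ nz ≤ max_z then
          neighbors ++ [(nx, ny, nz)]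
        else neighbors) []
  | _ => []  -- unpacking raises ValueError: excluded by Pre_

-- ===== PORT B =====
-- [v for v in (c-1, c, c+1) if 0 <= v <= m]
def pvAxis (c m : Int) : List Int :=
  ([c - 1, c, c + 1] : List Int).filter (fun v => decide (0 ≤ v ∧ v ≤ m))

-- product_rec: variable-length Python tuples are encoded as List Int (type convention)
def pvProdRec : List (List Int) → List (List Int)
  | [] => [[]]
  | axs0 :: rest => axs0.flatMap (fun v => (pvProdRec rest).map (fun t => v :: t))

-- decode the length-3 tuple encoding back to a triple for the declared return type
def pvCell (cell : List Int) : Int × Int × Int :=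
  match cell with
  | a :: rest =>
    (match rest with
     | b :: rest2 =>
       (match rest2 with
        | c :: rest3 =>
          (match rest3 with
           | [] => (a, b, c)
           | _ :: _ => (0, 0, 0))
        | [] => (0, 0, 0))
     | [] => (0, 0, 0))
  | [] => (0, 0, 0)

def get_26neighbors_alt (volume_shape : List Int) (x : Int) (y : Int) (z : Int) : List (Int × Int × Int) :=
  match volume_shape with
  | d0 :: rest1 =>
    (match rest1 with
     | d1 :: rest2 =>
       (match rest2 with
        | d2 :: rest3 =>
          (match rest3 with
           | [] =>
             let max_z := d0 - 1
             let max_y := d1 - 1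
             let max_x := d2 - 1
             let axes := [pvAxis x max_x, pvAxis y max_y, pvAxis z max_z]
             (((pvProdRec axes).filter (fun cell => decide (¬ cell = [x, y, z]))).map pvCell)
           | _ :: _ => [])  -- unpacking raises ValueError: excluded by Pre_
        | [] => [])
     | [] => [])
  | [] => []

-- ===== PRECONDITION & SPEC =====
-- Both Pythons unpack 'd - 1 for d in volume_shape' into three names: any other length raises ValueError.
def Pre_get_26neighbors (volume_shape : List Int) (x : Int) (y : Int) (z : Int) : Prop :=
  volume_shape.length = 3
instance (volume_shape : List Int) (x : Int) (y : Int) (z : Int) : Decidable (Pre_get_26neighbors volume_shape x y z) := by unfold Pre_get_26neighbors; infer_instance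

def pvWitness_get_26neighbors : List Int × Int × Int × Int := ([3, 3, 3], 1, 1, 1)

def Spec_get_26neighbors (volume_shape : List Int) (x : Int) (y : Int) (z : Int) (out : List (Int × Int × Int)) : Prop := out = get_26neighbors_alt volume_shape x y z
instance (volume_shape : List Int) (x : Int) (y : Int) (z : Int) (out : List (Int × Int × Int)) : Decidable (Spec_get_26neighbors volume_shape x y z out) := by unfold Spec_get_26neighbors; infer_instance

-- ===== CLAIM (what is proved, stated in full; the proofs are below) =====
def Claim_equal_get_26neighbors : Prop := ∀ (volume_shape : List Int) (x : Int) (y : Int) (z : Int), Dom_get_26neighbors volume_shape x y z → Pre_get_26neighbors volume_shape x y z → Spec_get_26neighbors volume_shape x y z (get_26neighbors volume_shape x y z)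

-- ===== LEMMAS AND PROOFS =====

-- the clamped axis list is the in-bounds part of the 3-candidate window, written as offsets
theorem pvAxis_eq (c m : Int) :
    pvAxis c m = (([-1, 0, 1] : List Int).filter (fun d => decide (0 ≤ c + d ∧ c + d ≤ m))).map
      (fun d => c + d) := by
  have h : ([c - 1, c, c + 1] : List Int) = ([-1, 0, 1] : List Int).map (fun d => c + d) := by
    simp only [List.map_cons, List.map_nil, List.cons.injEq, and_true]
    omega
  rw [pvAxis, h, List.filter_map]
  rfl

theorem pv_prod3 (A B C : List Int) :
    pvProdRec [A, B, C] = A.flatMap (fun a => B.flatMap (fun b => C.map (fun c => [a, b, c]))) := by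
  have hsingle : ∀ {α β : Type} (f : α → List β) (l : List α),
      l.flatMap (fun v => [f v]) = l.map f := by
    intro α β f l
    induction l with
    | nil => rfl
    | cons a t ih => simp [ih]
  simp [pvProdRec, List.map_flatMap, hsingle, Function.comp_def]

-- flatMap over a filtered list = flatMap with an emptiness guard
theorem pv_flatMap_filter {α β : Type} (p : α → Bool) (g : α → List β) (l : List α) :
    (l.filter p).flatMap g = l.flatMap (fun a => if p a then g a else []) := by
  induction l with
  | nil => rfl
  | cons a t ih =>
    by_cases h : p a <;> simp [h, ih]

theorem pv_main (d0 d1 d2 x y z : Int) :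
    get_26neighbors [d0, d1, d2] x y z = get_26neighbors_alt [d0, d1, d2] x y z := by
  show pvDeltas.foldl (fun neighbors t =>
      if t.1 = 0 ∧ t.2.1 = 0 ∧ t.2.2 = 0 then neighbors
      else if 0 ≤ x + t.1 ∧ x + t.1 ≤ d2 - 1 ∧ 0 ≤ y + t.2.1 ∧ y + t.2.1 ≤ d1 - 1 ∧
              0 ≤ z + t.2.2 ∧ z + t.2.2 ≤ d0 - 1 then
        neighbors ++ [(x + t.1, y + t.2.1, z + t.2.2)]
      else neighbors) []
    = ((pvProdRec [pvAxis x (d2 - 1), pvAxis y (d1 - 1), pvAxis z (d0 - 1)]).filter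
        (fun cell => decide (¬ cell = [x, y, z]))).map pvCell
  -- A: two-branch step = one guarded append
  have hstep : (fun (neighbors : List (Int × Int × Int)) (t : Int × Int × Int) =>
      if t.1 = 0 ∧ t.2.1 = 0 ∧ t.2.2 = 0 then neighbors
      else if 0 ≤ x + t.1 ∧ x + t.1 ≤ d2 - 1 ∧ 0 ≤ y + t.2.1 ∧ y + t.2.1 ≤ d1 - 1 ∧
              0 ≤ z + t.2.2 ∧ z + t.2.2 ≤ d0 - 1 then
        neighbors ++ [(x + t.1, y + t.2.1, z + t.2.2)]
      else neighbors)
    = (fun (acc : List (Int × Int × Int)) (t : Int × Int × Int) =>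
      if ¬ (t.1 = 0 ∧ t.2.1 = 0 ∧ t.2.2 = 0) ∧ 0 ≤ x + t.1 ∧ x + t.1 ≤ d2 - 1 ∧
          0 ≤ y + t.2.1 ∧ y + t.2.1 ≤ d1 - 1 ∧ 0 ≤ z + t.2.2 ∧ z + t.2.2 ≤ d0 - 1 then
        acc ++ [(x + t.1, y + t.2.1, z + t.2.2)]
      else acc) := by
    funext acc t
    by_cases h1 : t.1 = 0 ∧ t.2.1 = 0 ∧ t.2.2 = 0 <;>
      by_cases h2 : 0 ≤ x + t.1 ∧ x + t.1 ≤ d2 - 1 ∧ 0 ≤ y + t.2.1 ∧ y + t.2.1 ≤ d1 - 1 ∧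
        0 ≤ z + t.2.2 ∧ z + t.2.2 ≤ d0 - 1 <;>
      simp [h1, h2]
  rw [hstep, PySem.List.foldl_append_ite
    (p := fun (t : Int × Int × Int) => ¬ (t.1 = 0 ∧ t.2.1 = 0 ∧ t.2.2 = 0) ∧ 0 ≤ x + t.1 ∧
      x + t.1 ≤ d2 - 1 ∧ 0 ≤ y + t.2.1 ∧ y + t.2.1 ≤ d1 - 1 ∧ 0 ≤ z + t.2.2 ∧ z + t.2.2 ≤ d0 - 1)
    (f := fun (t : Int × Int × Int) => (x + t.1, y + t.2.1, z + t.2.2))]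
  -- B: unfold the recursive product into nested flatMaps over the axis windows
  rw [pv_prod3, pvAxis_eq, pvAxis_eq, pvAxis_eq, List.nil_append]
  rw [pvDeltas]
  simp only [List.filter_flatMap, List.map_flatMap, List.filter_map, List.map_map,
    List.flatMap_map, List.filter_filter, Function.comp_def]
  simp only [pv_flatMap_filter]
  congr 1
  funext dx
  by_cases hqx : 0 ≤ x + dx ∧ x + dx ≤ d2 - 1
  · rw [if_pos (by simpa using hqx)]
    congr 1
    funext dy
    by_cases hqy : 0 ≤ y + dy ∧ y + dy ≤ d1 - 1
    · rw [if_pos (by simpa using hqy)]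
      have hf : ∀ dz : Int,
          (decide (¬ (dx = 0 ∧ dy = 0 ∧ dz = 0) ∧ 0 ≤ x + dx ∧ x + dx ≤ d2 - 1 ∧
            0 ≤ y + dy ∧ y + dy ≤ d1 - 1 ∧ 0 ≤ z + dz ∧ z + dz ≤ d0 - 1))
          = (decide (0 ≤ z + dz ∧ z + dz ≤ d0 - 1) &&
             decide (¬ ((x + dx) :: (y + dy) :: (z + dz) :: ([] : List Int) = [x, y, z]))) := by
        intro dz
        rw [← Bool.decide_and]
        simp only [decide_eq_decide, List.cons.injEq, and_true]
        constructor
        · rintro ⟨hc, hb⟩; exact ⟨⟨by omega, by omega⟩, by omega⟩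
        · rintro ⟨hb, hc⟩; exact ⟨by omega, hqx.1, hqx.2, hqy.1, hqy.2, hb.1, hb.2⟩
      rw [List.filter_congr (fun dz _ => hf dz)]
      simp only [pvCell, Bool.decide_and]
      congr 1
      apply List.filter_congr
      intro a _
      simp [Bool.and_comm, Bool.and_left_comm]
    · rw [if_neg (by simpa using hqy)]
      rw [List.filter_eq_nil_iff.mpr ?_, List.map_nil]
      intro dz _
      simp only [decide_eq_true_eq]
      omega
  · rw [if_neg (by simpa using hqx)]
    apply List.flatMap_eq_nil_iff.mpr
    intro dy _
    rw [List.filter_eq_nil_iff.mpr ?_, List.map_nil]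
    intro dz _
    simp only [decide_eq_true_eq]
    omega

-- ===== VERDICT (by name: the statement is the Claim_ definition above) =====
theorem get_26neighbors_spec : Claim_equal_get_26neighbors := by
  intro vs x y z _dom hpre
  unfold Spec_get_26neighbors
  match vs, hpre with
  | [d0, d1, d2], _ => exact pv_main d0 d1 d2 x y z
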